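-- pv_equiv track=rewrite | github.com/daniel-reich/ubiquitous-fiesta | W3Hptw6ieTtrWNw4H_6.py | bifid
-- ===== SOURCE A (Python) =====
-- def bifid(s):
--   z = 'abcdefghiklmnopqrstuvwxyz'
--   n = [str((i // 5 + 1) *10 + i % 5 + 1) for i in range(26)]
--   d = dict(zip(z, n))
--   r = {v : k for k, v in d.items()}
--
--   if ' ' in s:
--     s = ''.join(c for c in s.lower() if c.isalpha()).replace("j", "i")
--     p = ''.join(d[c] for c in s)
--     cip = p[::2] + p[1::2]
--     return ''.join(r[cip[n:n+2]] for n in range(0, len(cip), 2))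
--
--   else:
--     p = ''.join(d[c] for c in s)
--     b, e = p[:len(p)//2], p[len(p)//2:]
--     cip = list(zip(b, e))
--     return ''.join(r[''.join(x)] for x in cip)
-- ===== SOURCE B (Python) =====
-- # B: coordinate arithmetic instead of lookup tables: a letter encodes to (row, col) = divmod(index, 5)
-- # and a coordinate pair decodes back as Z[row * 5 + col]; no encode/decode dicts at all.
-- Z = 'abcdefghiklmnopqrstuvwxyz'
--
-- def _row(c):
--     return Z.index(c) // 5
--
-- def _col(c):
--     return Z.index(c) % 5
--
-- def bifid(s):
--     if ' ' in s:
--         letters = ['i' if c == 'j' else c for c in s.lower() if c.isalpha()]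
--         seq = [_row(c) for c in letters] + [_col(c) for c in letters]
--         return ''.join(Z[seq[2 * k] * 5 + seq[2 * k + 1]] for k in range(len(letters)))
--     else:
--         digits = [x for c in s for x in (_row(c), _col(c))]
--         h = len(digits) // 2
--         return ''.join(Z[digits[k] * 5 + digits[h + k]] for k in range(h))
-- ===== Notes on version B (the rewrite author's own statement) =====
-- stated objective: simpler
-- what changed: B drops both lookup dicts: a letter becomes its (row,col) coordinates by divmod(index,5) carried as integers, and each recombined coordinate pair is decoded by the closed-form index Z[row*5+col] instead of a reverse string-keyed table.
import Mathlib
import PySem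

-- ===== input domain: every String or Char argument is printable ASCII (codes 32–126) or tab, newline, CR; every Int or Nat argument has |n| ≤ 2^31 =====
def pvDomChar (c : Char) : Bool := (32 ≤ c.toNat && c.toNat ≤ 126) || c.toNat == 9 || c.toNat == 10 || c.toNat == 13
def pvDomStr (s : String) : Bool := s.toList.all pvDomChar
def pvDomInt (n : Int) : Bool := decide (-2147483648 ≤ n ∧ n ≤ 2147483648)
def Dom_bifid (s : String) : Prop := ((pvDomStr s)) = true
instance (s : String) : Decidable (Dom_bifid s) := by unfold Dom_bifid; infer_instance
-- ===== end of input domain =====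

-- B drops the two lookup dicts of A: letters are carried as integer (row,col) coordinates obtained
-- by divmod of the index in the alphabet, and coordinate pairs decode by the closed-form index
-- Z[row*5 + col] instead of a reverse string-keyed table.  Objective: simpler.

-- ===== PORT A =====
def bifidZ : List Char := "abcdefghiklmnopqrstuvwxyz".toList
def bifidN : List (List Char) :=
  (List.range 26).map (fun i =>
    PySem.Int.toChars ((PySem.Int.floordiv i 5 + 1) * 10 + PySem.Int.mod i 5 + 1))
def bifidD : PySem.Dict Char (List Char) := PySem.Dict.ofList (bifidZ.zip bifidN)
def bifidR : PySem.Dict (List Char) Char :=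
  PySem.Dict.ofList (bifidD.items.map (fun kv => (kv.2, kv.1)))

def bifid (s : String) : String :=
  if PySem.Str.isIn " " s then
    let t := PySem.Chars.replace ((PySem.Chars.lower s.toList).filter PySem.Chars.isalpha) ['j'] ['i']
    let p := (t.map (fun c => bifidD.getD c [])).flatten   -- d[c]: every c here is a key of d
    let cip := (PySem.List.slice? p none none 2).getD [] ++ (PySem.List.slice? p (some 1) none 2).getD []
    String.ofList ((PySem.List.pyRange 0 cip.length 2).map (fun n =>
      bifidR.getD (PySem.List.slice cip (some n) (some (n + 2))) ' '))
  else
    -- d[c] raises KeyError when c is not a key of d: those inputs are excluded by Pre_bifid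
    let p := (s.toList.map (fun c => bifidD.getD c [])).flatten
    let h := PySem.Int.floordiv p.length 2
    let b := PySem.List.slice p none (some h)
    let e := PySem.List.slice p (some h) none
    let cip := b.zip e
    String.ofList (cip.map (fun x => bifidR.getD [x.1, x.2] ' '))

-- ===== PORT B =====
def bifidZB : List Char := "abcdefghiklmnopqrstuvwxyz".toList   -- Source B's own constant Z
-- _row / _col of Source B; Chars.find is exact for Z.index(c) whenever c occurs in Z (inside Pre_ it always does)
def bifidRow (c : Char) : Int := PySem.Int.floordiv (PySem.Chars.find bifidZB [c]) 5
def bifidCol (c : Char) : Int := PySem.Int.mod (PySem.Chars.find bifidZB [c]) 5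

def bifid_alt (s : String) : String :=
  if PySem.Str.isIn " " s then
    let letters := ((PySem.Chars.lower s.toList).filter PySem.Chars.isalpha).map
      (fun c => if c = 'j' then 'i' else c)
    let seq : List Int := letters.map bifidRow ++ letters.map bifidCol
    String.ofList ((List.range letters.length).map (fun (k : Nat) =>
      PySem.List.pyGetD bifidZB
        (PySem.List.pyGetD seq (2 * (k : Int)) 0 * 5 + PySem.List.pyGetD seq (2 * (k : Int) + 1) 0) ' '))
  else
    let digits : List Int := s.toList.flatMap (fun c => [bifidRow c, bifidCol c])
    let h := PySem.Int.floordiv digits.length 2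
    String.ofList ((PySem.List.pyRange 0 h 1).map (fun k =>
      PySem.List.pyGetD bifidZB
        (PySem.List.pyGetD digits k 0 * 5 + PySem.List.pyGetD digits (h + k) 0) ' '))

-- ===== PRECONDITION & SPEC =====
-- Pre_ excludes exactly the inputs where A raises: a string without a space containing a character
-- that is not a key of d (not one of the 25 alphabet letters), on which d[c] raises KeyError.
def Pre_bifid (s : String) : Prop :=
  PySem.Str.isIn " " s = true ∨ s.toList.all (fun c => bifidZ.contains c) = true
instance (s : String) : Decidable (Pre_bifid s) := by unfold Pre_bifid; infer_instance
def pvWitness_bifid : String := "at dawn"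
def Spec_bifid (s : String) (out : String) : Prop := out = bifid_alt s
instance (s : String) (out : String) : Decidable (Spec_bifid s out) := by unfold Spec_bifid; infer_instance

-- ===== CLAIM (what is proved, stated in full; the proofs are below) =====
def Claim_equal_bifid : Prop := ∀ (s : String), Dom_bifid s → Pre_bifid s → Spec_bifid s (bifid s)

-- ===== LEMMAS AND PROOFS =====

theorem bifidZB_eq : bifidZB = bifidZ := rfl

-- the digit character of a 0-based coordinate v ∈ [0,5): '1'..'5'
def bifidDig (v : Int) : Char := Char.ofNat (49 + v.toNat)
-- A's post-filter letter fixup j→i, as B writes it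
def bifidFix (c : Char) : Char := if c = 'j' then 'i' else c

-- per-letter table facts, finite checks over the 25 letters / 5×5 coordinate pairs
theorem bifid_tableA : (bifidZ.all (fun c =>
    (bifidD.getD c [] == [bifidDig (bifidRow c), bifidDig (bifidCol c)]) &&
    decide (0 ≤ bifidRow c ∧ bifidRow c < 5 ∧ 0 ≤ bifidCol c ∧ bifidCol c < 5))) = true := by decide

theorem bifid_tableR : ((List.range 5).all (fun a => (List.range 5).all (fun b =>
    bifidR.getD [bifidDig a, bifidDig b] ' ' ==
      PySem.List.pyGetD bifidZ ((a : Int) * 5 + (b : Int)) ' '))) = true := by decide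

-- any printable-ASCII character that is alphabetic after lowering lands in the alphabet after j→i
theorem bifid_domTable : ((List.range 127).all (fun n =>
    !(PySem.Chars.isalpha (PySem.Chars.lowerChar (Char.ofNat n))) ||
      bifidZ.contains (bifidFix (PySem.Chars.lowerChar (Char.ofNat n))))) = true := by decide

theorem bifid_code_eq {c : Char} (h : c ∈ bifidZ) :
    bifidD.getD c [] = [bifidDig (bifidRow c), bifidDig (bifidCol c)] := by
  have := List.all_eq_true.mp bifid_tableA c h
  simp only [Bool.and_eq_true, beq_iff_eq] at this
  exact this.1

theorem bifid_row_bounds {c : Char} (h : c ∈ bifidZ) :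
    0 ≤ bifidRow c ∧ bifidRow c < 5 ∧ 0 ≤ bifidCol c ∧ bifidCol c < 5 := by
  have := List.all_eq_true.mp bifid_tableA c h
  simp only [Bool.and_eq_true, decide_eq_true_eq] at this
  exact this.2

theorem bifid_decode_eq {a b : Int} (ha0 : 0 ≤ a) (ha : a < 5) (hb0 : 0 ≤ b) (hb : b < 5) :
    bifidR.getD [bifidDig a, bifidDig b] ' ' = PySem.List.pyGetD bifidZ (a * 5 + b) ' ' := by
  have ha' : a.toNat ∈ List.range 5 := by simp [List.mem_range]; omega
  have hb' : b.toNat ∈ List.range 5 := by simp [List.mem_range]; omega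
  have := List.all_eq_true.mp (List.all_eq_true.mp bifid_tableR _ ha') _ hb'
  simp only [beq_iff_eq] at this
  have e1 : ((a.toNat : Int)) = a := Int.toNat_of_nonneg ha0
  have e2 : ((b.toNat : Int)) = b := Int.toNat_of_nonneg hb0
  rw [e1, e2] at this
  exact this

theorem bifid_mem_of_dom {c : Char} (h : pvDomChar c = true)
    (ha : PySem.Chars.isalpha (PySem.Chars.lowerChar c) = true) :
    bifidFix (PySem.Chars.lowerChar c) ∈ bifidZ := by
  have hn : c.toNat ∈ List.range 127 := by
    simp only [pvDomChar, Bool.or_eq_true, Bool.and_eq_true, beq_iff_eq, decide_eq_true_eq,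
      Nat.le_iff_lt_or_eq] at h
    simp [List.mem_range]; omega
  have := List.all_eq_true.mp bifid_domTable _ hn
  rw [Char.ofNat_toNat] at this
  simp only [Bool.or_eq_true, Bool.not_eq_true'] at this
  rcases this with h' | h'
  · rw [ha] at h'; cases h'
  · exact List.contains_iff_mem.mp h'

-- Python str.replace with a single-character pattern is a pointwise map
theorem bifid_replace_go (fuel : Nat) :
    ∀ (l acc : List Char), l.length ≤ fuel →
      PySem.Chars.replace.go ['j'] ['i'] fuel l acc = acc.reverse ++ l.map bifidFix := by
  induction fuel with
  | zero =>
    intro l acc h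
    have : l = [] := List.eq_nil_of_length_eq_zero (Nat.le_zero.mp h)
    subst this
    simp [PySem.Chars.replace.go]
  | succ n ih =>
    intro l acc h
    cases l with
    | nil => simp [PySem.Chars.replace.go]
    | cons c t =>
      simp only [PySem.Chars.replace.go]
      by_cases hc : c = 'j'
      · subst hc
        have : List.isPrefixOf ['j'] ('j' :: t) = true := by simp [List.isPrefixOf]
        rw [if_pos this]
        rw [show List.drop (['j'].length) ('j' :: t) = t from rfl, ih t _ (by simpa using h)]
        simp [bifidFix]
      · have : List.isPrefixOf ['j'] (c :: t) = false := by
          simp [List.isPrefixOf]; exact fun h => absurd h.symm hc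
        rw [if_neg (by simp [this])]
        rw [ih t _ (by simpa using h)]
        simp [bifidFix, hc]

theorem bifid_replace_eq (l : List Char) :
    PySem.Chars.replace l ['j'] ['i'] = l.map bifidFix := by
  rw [PySem.Chars.replace]
  simp only [List.isEmpty_cons]
  simpa using bifid_replace_go l.length l [] le_rfl

-- flat pair lists
theorem bifid_flatPair_length {α β : Type} (f g : α → β) (L : List α) :
    (L.flatMap (fun c => [f c, g c])).length = 2 * L.length := by
  induction L with
  | nil => simp
  | cons x xs ih => simp [ih]; omega

theorem bifid_flatPair_getElem? {α β : Type} (f g : α → β) (L : List α) (k : Nat)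
    (hk : k < L.length) :
    (L.flatMap (fun c => [f c, g c]))[2 * k]? = some (f L[k]) ∧
    (L.flatMap (fun c => [f c, g c]))[2 * k + 1]? = some (g L[k]) := by
  induction L generalizing k with
  | nil => simp at hk
  | cons x xs ih =>
    cases k with
    | zero => simp
    | succ m =>
      have hm : m < xs.length := by simpa using hk
      have := ih m hm
      constructor
      · have : (2 * (m + 1)) = (2 * m) + 2 := by omega
        rw [this]
        simpa using (ih m hm).1
      · have : (2 * (m + 1) + 1) = (2 * m + 1) + 2 := by omega
        rw [this]
        simpa using (ih m hm).2

theorem bifid_slice2_even {α : Type} (f g : Char → α) (L : List Char) :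
    (PySem.List.slice? (L.flatMap (fun c => [f c, g c])) none none 2).getD [] = L.map f := by
  simp only [PySem.List.slice?, PySem.List.sliceIndices]
  norm_num
  rw [show (if 0 < L.length then (((L.length:Int) * 2 + 2 - 1) / 2).toNat else 0) = L.length by
    split <;> omega]
  rw [List.filterMap_congr (g := fun x : Nat => some (f (L.getD x 'a'))) ?_]
  · rw [show (fun x : Nat => some (f (L.getD x 'a'))) = some ∘ (fun x : Nat => f (L.getD x 'a')) from rfl,
      List.filterMap_eq_map]
    apply List.ext_getElem (by simp)
    intro i h1 h2
    simp [List.getD_eq_getElem?_getD, List.getElem?_eq_getElem (by simpa using h1)]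
  · intro x hx
    have hx' : x < L.length := by simpa [List.mem_range] using hx
    rw [show ((2 * (x:Int)).toNat) = 2 * x by omega]
    rw [(bifid_flatPair_getElem? f g L x hx').1]
    simp [List.getD_eq_getElem?_getD, List.getElem?_eq_getElem hx']

theorem bifid_slice2_odd {α : Type} (f g : Char → α) (L : List Char) :
    (PySem.List.slice? (L.flatMap (fun c => [f c, g c])) (some 1) none 2).getD [] = L.map g := by
  simp only [PySem.List.slice?, PySem.List.sliceIndices]
  norm_num
  rcases L with _ | ⟨c0, L0⟩
  · simp
  set L := c0 :: L0 with hLdef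
  have hn : 0 < L.length := by simp [hLdef]
  rw [show min 1 ((L.length:Int) * 2) = 1 by omega]
  rw [show (if 1 < (L.length:Int) * 2 then (((L.length:Int) * 2 - 1 + 2 - 1) / 2).toNat else 0)
        = L.length by split <;> omega]
  rw [List.filterMap_congr (g := fun x : Nat => some (g (L.getD x 'a'))) ?_]
  · rw [show (fun x : Nat => some (g (L.getD x 'a'))) = some ∘ (fun x : Nat => g (L.getD x 'a')) from rfl,
      List.filterMap_eq_map]
    apply List.ext_getElem (by simp)
    intro i h1 h2
    simp [List.getD_eq_getElem?_getD, List.getElem?_eq_getElem (by simpa using h1)]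
  · intro x hx
    have hx' : x < L.length := by simpa [List.mem_range] using hx
    rw [show ((1 + 2 * (x:Int)).toNat) = 2 * x + 1 by omega]
    rw [(bifid_flatPair_getElem? f g L x hx').2]
    simp [List.getD_eq_getElem?_getD, List.getElem?_eq_getElem hx']

theorem bifid_take_drop_two {α : Type} (l : List α) (j : Nat) (h : j + 1 < l.length) :
    (l.drop j).take 2 = [l[j], l[j + 1]] := by
  apply List.ext_getElem (by simp; omega)
  intro i h1 h2
  have hi : i < 2 := by simpa using h2
  interval_cases i <;> simp [List.getElem_take, List.getElem_drop]

-- the space branch, on the common letter list L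
theorem bifid_branch1 (L : List Char) (hL : ∀ c ∈ L, c ∈ bifidZ) :
    (PySem.List.pyRange 0
        (((PySem.List.slice? ((L.map (fun c => bifidD.getD c [])).flatten) none none 2).getD [] ++
          (PySem.List.slice? ((L.map (fun c => bifidD.getD c [])).flatten) (some 1) none 2).getD []).length : Int) 2).map
      (fun n => bifidR.getD (PySem.List.slice
          ((PySem.List.slice? ((L.map (fun c => bifidD.getD c [])).flatten) none none 2).getD [] ++
           (PySem.List.slice? ((L.map (fun c => bifidD.getD c [])).flatten) (some 1) none 2).getD [])
          (some n) (some (n + 2))) ' ')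
    = (List.range L.length).map (fun (k : Nat) =>
        PySem.List.pyGetD bifidZ
          (PySem.List.pyGetD (L.map bifidRow ++ L.map bifidCol) (2 * (k : Int)) 0 * 5 +
           PySem.List.pyGetD (L.map bifidRow ++ L.map bifidCol) (2 * (k : Int) + 1) 0) ' ') := by
  set q : List Int := L.map bifidRow ++ L.map bifidCol with hq
  set n := L.length with hn
  have hqlen : q.length = n + n := by simp [hq, hn]
  have hqmem : ∀ v ∈ q, 0 ≤ v ∧ v < 5 := by
    intro v hv
    rw [hq] at hv
    rcases List.mem_append.mp hv with h | h <;>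
      obtain ⟨c, hc, rfl⟩ := List.mem_map.mp h <;> have hb := bifid_row_bounds (hL c hc)
    · exact ⟨hb.1, hb.2.1⟩
    · exact ⟨hb.2.2.1, hb.2.2.2⟩
  have hm : (L.map (fun c => bifidD.getD c [])).flatten =
      L.flatMap (fun c => [bifidDig (bifidRow c), bifidDig (bifidCol c)]) := by
    rw [List.map_congr_left (fun c hc => bifid_code_eq (hL c hc)), ← List.flatMap_def]
  rw [hm, bifid_slice2_even, bifid_slice2_odd]
  have hcip : L.map (fun c => bifidDig (bifidRow c)) ++ L.map (fun c => bifidDig (bifidCol c))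
      = q.map bifidDig := by
    rw [hq, List.map_append, List.map_map, List.map_map]
    rfl
  rw [hcip]
  have hMlen : (q.map bifidDig).length = n + n := by simpa using hqlen
  rw [hMlen]
  rw [PySem.List.pyRange_of_pos 0 ((n + n : Nat) : Int) (s := 2) (by norm_num)]
  rw [show (if (0:Int) < ((n + n : Nat) : Int) then ((((n + n : Nat) : Int) - 0 + 2 - 1) / 2).toNat else 0)
        = n by split <;> omega]
  rw [List.map_map]
  apply List.ext_getElem (by simp)
  intro k h1 h2
  have hk : k < n := by simpa using h1
  simp only [List.getElem_map, List.getElem_range, Function.comp_apply]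
  rw [show (0 : Int) + 2 * (k : Int) = ((2 * k : Nat) : Int) by push_cast [Nat.cast_mul]; ring]
  rw [show ((2 * k : Nat) : Int) + 2 = ((2 * k + 2 : Nat) : Int) by push_cast; ring]
  rw [PySem.List.slice_natCast]
  rw [show (2 * k + 2 - 2 * k) = 2 by omega]
  rw [bifid_take_drop_two _ _ (by simp [hqlen]; omega)]
  simp only [List.getElem_map]
  rw [bifid_decode_eq (hqmem _ (List.getElem_mem _)).1 (hqmem _ (List.getElem_mem _)).2
    (hqmem _ (List.getElem_mem _)).1 (hqmem _ (List.getElem_mem _)).2]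
  rw [show (2 * (k : Int)) = ((2 * k : Nat) : Int) by push_cast; ring]
  rw [show ((2 * k : Nat) : Int) + 1 = ((2 * k + 1 : Nat) : Int) by push_cast; ring]
  rw [PySem.List.pyGetD_natCast, PySem.List.pyGetD_natCast]
  rw [List.getD_eq_getElem?_getD, List.getD_eq_getElem?_getD,
    List.getElem?_eq_getElem (by omega), List.getElem?_eq_getElem (by omega)]
  simp

-- the no-space branch, on the common letter list L
theorem bifid_branch2 (L : List Char) (hL : ∀ c ∈ L, c ∈ bifidZ) :
    ((PySem.List.slice ((L.map (fun c => bifidD.getD c [])).flatten) none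
        (some (PySem.Int.floordiv (((L.map (fun c => bifidD.getD c [])).flatten).length : Int) 2))).zip
     (PySem.List.slice ((L.map (fun c => bifidD.getD c [])).flatten)
        (some (PySem.Int.floordiv (((L.map (fun c => bifidD.getD c [])).flatten).length : Int) 2)) none)).map
      (fun x => bifidR.getD [x.1, x.2] ' ')
    = (PySem.List.pyRange 0
        (PySem.Int.floordiv ((L.flatMap (fun c => [bifidRow c, bifidCol c])).length : Int) 2) 1).map
      (fun k => PySem.List.pyGetD bifidZ
          (PySem.List.pyGetD (L.flatMap (fun c => [bifidRow c, bifidCol c])) k 0 * 5 +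
           PySem.List.pyGetD (L.flatMap (fun c => [bifidRow c, bifidCol c]))
             (PySem.Int.floordiv ((L.flatMap (fun c => [bifidRow c, bifidCol c])).length : Int) 2 + k) 0) ' ') := by
  set w : List Int := L.flatMap (fun c => [bifidRow c, bifidCol c]) with hw
  set n := L.length with hn
  have hwlen : w.length = 2 * n := bifid_flatPair_length _ _ L
  have hwmem : ∀ v ∈ w, 0 ≤ v ∧ v < 5 := by
    intro v hv
    rw [hw] at hv
    simp only [List.mem_flatMap, List.mem_cons] at hv
    obtain ⟨c, hc, hv⟩ := hv
    have hb := bifid_row_bounds (hL c hc)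
    rcases hv with rfl | rfl | h
    · exact ⟨hb.1, hb.2.1⟩
    · exact ⟨hb.2.2.1, hb.2.2.2⟩
    · simp at h
  have hm : (L.map (fun c => bifidD.getD c [])).flatten = w.map bifidDig := by
    rw [List.map_congr_left (fun c hc => bifid_code_eq (hL c hc)), ← List.flatMap_def, hw,
      List.map_flatMap]
    simp
  rw [hm]
  have hmlen : (w.map bifidDig).length = 2 * n := by simpa using hwlen
  have hdiv : PySem.Int.floordiv (((w.map bifidDig).length : Int)) 2 = (n : Int) := by
    rw [hmlen, PySem.Int.floordiv_eq_ediv_of_pos (by norm_num)]; omega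
  have hdivw : PySem.Int.floordiv ((w.length : Int)) 2 = (n : Int) := by
    rw [hwlen, PySem.Int.floordiv_eq_ediv_of_pos (by norm_num)]; omega
  rw [hdiv, hdivw]
  rw [PySem.List.slice_to_natCast, PySem.List.slice_from_natCast]
  rw [PySem.List.pyRange_zero_nat n]
  rw [List.map_map]
  apply List.ext_getElem (by simp [hmlen]; omega)
  intro k h1 h2
  have hk : k < n := by
    have := h1; simp [hmlen] at this; omega
  have hk2 : n + k < w.length := by omega
  have hkw : k < w.length := by omega
  simp only [List.getElem_map, List.getElem_range, Function.comp_apply]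
  rw [List.getElem_zip]
  rw [List.getElem_take, List.getElem_drop]
  simp only [List.getElem_map]
  rw [bifid_decode_eq (hwmem _ (List.getElem_mem _)).1 (hwmem _ (List.getElem_mem _)).2
    (hwmem _ (List.getElem_mem _)).1 (hwmem _ (List.getElem_mem _)).2]
  rw [PySem.List.pyGetD_eq_getElem w 0 (by positivity) (by exact_mod_cast hkw),
    PySem.List.pyGetD_eq_getElem w 0 (by positivity) (by push_cast; omega)]
  simp only [← Nat.cast_add, Int.toNat_natCast]

-- ===== VERDICT (by name: the statement is the Claim_ definition above) =====
theorem bifid_spec : Claim_equal_bifid := by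
  intro s hdom hpre
  unfold Spec_bifid bifid bifid_alt
  rw [bifidZB_eq]
  by_cases hsp : PySem.Str.isIn " " s = true
  · rw [if_pos hsp, if_pos hsp]
    rw [bifid_replace_eq]
    set L := ((PySem.Chars.lower s.toList).filter PySem.Chars.isalpha).map bifidFix with hLdef
    have hL : ∀ c ∈ L, c ∈ bifidZ := by
      intro c hc
      rw [hLdef] at hc
      simp only [List.mem_map, List.mem_filter, PySem.Chars.lower, List.mem_map] at hc
      obtain ⟨c', ⟨⟨c0, hc0, rfl⟩, halpha⟩, rfl⟩ := hc
      have hdc : pvDomChar c0 = true := by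
        unfold Dom_bifid pvDomStr at hdom
        exact List.all_eq_true.mp hdom c0 hc0
      exact bifid_mem_of_dom hdc halpha
    have hfix : (fun c => if c = 'j' then 'i' else c) = bifidFix := by
      funext c; rfl
    rw [hfix]
    exact congrArg String.ofList (bifid_branch1 L hL)
  · rw [if_neg hsp, if_neg hsp]
    have hL : ∀ c ∈ s.toList, c ∈ bifidZ := by
      rcases hpre with h | h
      · exact absurd h hsp
      · intro c hc
        exact List.contains_iff_mem.mp (List.all_eq_true.mp h c hc)
    exact congrArg String.ofList (bifid_branch2 s.toList hL)
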